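-- pv_equiv track=rewrite | github.com/undermightysky/Python | Uebungen/testat2/python_testat2_fs2022/testat2_5024099.py | inventory
-- ===== SOURCE A (Python) =====
-- def inventory(elements) -> str:
--     '''
--     returns element names as formated string
--     '''
--
--     inv = {'Resistors': [], 'Voltage Sources': [], 'Current Sources': []}
--
--     for e in elements.keys():
--         if('R' in e.upper()):
--             inv['Resistors'].append(e.capitalize())
--         if('V' in e.upper()):
--             inv['Voltage Sources'].append(e.capitalize())
--         if('I' in e.upper()):
--             inv['Current Sources'].append(e.capitalize())
--
--     res = ''
--
--     for key, value in inv.items():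
--         res += key + ': '
--         res += ', '.join(value)
--         res += '\r\n'
--
--     return '\r\n'.join(res.splitlines())
-- ===== SOURCE B (Python) =====
-- def inventory(elements) -> str:
--     '''
--     returns element names as formated string
--     '''
--     keys = list(elements.keys())
--     categories = [('Resistors', 'R'), ('Voltage Sources', 'V'), ('Current Sources', 'I')]
--     res = ''.join(
--         name + ': ' + ', '.join(e.capitalize() for e in keys if ch in e.upper()) + '\r\n'
--         for name, ch in categories)
--     return '\r\n'.join(res.splitlines())
-- ===== Notes on version B (the rewrite author's own statement) =====
-- stated objective: simpler
-- what changed: Replaces the single key-loop that updates three accumulator lists in a dict with three independent filter-and-capitalize comprehensions (one per category letter) joined directly into the output, eliminating the dict and the mutable accumulators.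
import Mathlib
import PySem

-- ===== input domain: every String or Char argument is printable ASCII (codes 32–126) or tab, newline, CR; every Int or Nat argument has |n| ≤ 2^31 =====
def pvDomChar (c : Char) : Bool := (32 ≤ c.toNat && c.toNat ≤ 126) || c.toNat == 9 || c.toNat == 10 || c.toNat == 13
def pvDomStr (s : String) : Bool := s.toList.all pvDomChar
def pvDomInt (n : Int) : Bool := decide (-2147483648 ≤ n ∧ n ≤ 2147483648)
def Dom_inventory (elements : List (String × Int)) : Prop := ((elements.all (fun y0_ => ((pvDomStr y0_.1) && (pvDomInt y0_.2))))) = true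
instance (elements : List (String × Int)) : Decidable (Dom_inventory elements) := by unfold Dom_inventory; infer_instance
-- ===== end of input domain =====

-- B replaces A's single loop updating three dict-held accumulator lists with three
-- independent filter-and-capitalize passes joined directly into the output (objective: simpler).

-- str.capitalize(): first char uppercased, rest lowercased (exact on the ASCII domain)
def pvCap (cs : List Char) : List Char :=
  match cs with
  | [] => []
  | c :: r => PySem.Chars.upperChar c :: r.map PySem.Chars.lowerChar

-- 'c' in e.upper()
def pvHas (c : Char) (e : String) : Bool := PySem.Chars.isIn [c] (PySem.Chars.upper e.toList)

-- ===== PORT A =====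
-- A's dict 'inv' has the three fixed keys throughout; it is modelled as a triple of lists
-- (Resistors, Voltage Sources, Current Sources) in that fixed insertion order.
def pvStepA (acc : List (List Char) × List (List Char) × List (List Char)) (e : String) :
    List (List Char) × List (List Char) × List (List Char) :=
  let acc := if pvHas 'R' e then (acc.1 ++ [pvCap e.toList], acc.2.1, acc.2.2) else acc
  let acc := if pvHas 'V' e then (acc.1, acc.2.1 ++ [pvCap e.toList], acc.2.2) else acc
  if pvHas 'I' e then (acc.1, acc.2.1, acc.2.2 ++ [pvCap e.toList]) else acc

def inventory (elements : List (String × Int)) : String :=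
  let keys := PySem.List.dedup (elements.map Prod.fst)   -- elements.keys(): first occurrences in order
  let inv := keys.foldl pvStepA ([], [], [])
  let items := [("Resistors".toList, inv.1), ("Voltage Sources".toList, inv.2.1),
                ("Current Sources".toList, inv.2.2)]
  let res := items.foldl
    (fun r kv => r ++ kv.1 ++ ": ".toList ++ PySem.Chars.join ", ".toList kv.2 ++ "\r\n".toList) []
  String.ofList (PySem.Chars.join "\r\n".toList (PySem.Chars.splitlines res))

-- ===== PORT B =====
def pvLineB (keys : List String) (name : List Char) (c : Char) : List Char :=
  name ++ ": ".toList ++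
    PySem.Chars.join ", ".toList ((keys.filter (pvHas c)).map (fun e => pvCap e.toList)) ++
    "\r\n".toList

def inventory_alt (elements : List (String × Int)) : String :=
  let keys := PySem.List.dedup (elements.map Prod.fst)
  let res := PySem.Chars.join []
    [pvLineB keys "Resistors".toList 'R',
     pvLineB keys "Voltage Sources".toList 'V',
     pvLineB keys "Current Sources".toList 'I']
  String.ofList (PySem.Chars.join "\r\n".toList (PySem.Chars.splitlines res))

-- ===== PRECONDITION & SPEC =====
def Spec_inventory (elements : List (String × Int)) (out : String) : Prop := out = inventory_alt elements
instance (elements : List (String × Int)) (out : String) : Decidable (Spec_inventory elements out) := by unfold Spec_inventory; infer_instance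

-- ===== CLAIM (what is proved, stated in full; the proofs are below) =====
def Claim_equal_inventory : Prop := ∀ (elements : List (String × Int)), Dom_inventory elements → Spec_inventory elements (inventory elements)

-- ===== LEMMAS AND PROOFS =====

-- A's accumulator loop computes the three filtered-and-capitalized lists.
theorem foldl_stepA (ks : List String) (acc : List (List Char) × List (List Char) × List (List Char)) :
    ks.foldl pvStepA acc =
      (acc.1 ++ (ks.filter (pvHas 'R')).map (fun e => pvCap e.toList),
       acc.2.1 ++ (ks.filter (pvHas 'V')).map (fun e => pvCap e.toList),
       acc.2.2 ++ (ks.filter (pvHas 'I')).map (fun e => pvCap e.toList)) := by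
  induction ks generalizing acc with
  | nil => simp
  | cons k ks ih =>
    simp only [List.foldl_cons, ih, pvStepA, List.filter_cons]
    by_cases hR : pvHas 'R' k <;> by_cases hV : pvHas 'V' k <;> by_cases hI : pvHas 'I' k <;>
      simp [hR, hV, hI]

-- ===== VERDICT (by name: the statement is the Claim_ definition above) =====
theorem inventory_spec : Claim_equal_inventory := by
  intro elements _
  show inventory elements = inventory_alt elements
  simp [inventory, inventory_alt, foldl_stepA, pvLineB, PySem.Chars.join, List.intercalate,
    List.intersperse, List.append_assoc]
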